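-- pv_equiv track=rewrite | github.com/amargupta28/datastructure-linklist | maxTemp.py | getMaxTemp
-- ===== SOURCE A (Python) =====
-- def getMaxTemp(arr):
--     su = sum(arr)
--     i=0
--     max_temp=0
--
--     while i < len(arr):
--         t1=arr[:i+1]
--         t2=arr[i:len(arr)]
--
--         if max(sum(t1),sum(t2)) > max_temp:
--             max_temp =max(sum(t1),sum(t2))
--         i+=1
--     return max_temp
-- ===== SOURCE B (Python) =====
-- def getMaxTemp(arr):
--     total = sum(arr)
--     best = 0
--     pref = 0
--     for x in arr:
--         suf = total - pref
--         pref += x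
--         best = max(max(best, pref), suf)
--     return best
-- ===== Notes on version B (the rewrite author's own statement) =====
-- stated objective: faster
-- what changed: Replaces the per-split slicing and re-summing (sum(arr[:i+1]), sum(arr[i:]) for every i) by a single pass maintaining a running prefix sum, deriving each suffix sum as total - prefix.
import Mathlib
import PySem

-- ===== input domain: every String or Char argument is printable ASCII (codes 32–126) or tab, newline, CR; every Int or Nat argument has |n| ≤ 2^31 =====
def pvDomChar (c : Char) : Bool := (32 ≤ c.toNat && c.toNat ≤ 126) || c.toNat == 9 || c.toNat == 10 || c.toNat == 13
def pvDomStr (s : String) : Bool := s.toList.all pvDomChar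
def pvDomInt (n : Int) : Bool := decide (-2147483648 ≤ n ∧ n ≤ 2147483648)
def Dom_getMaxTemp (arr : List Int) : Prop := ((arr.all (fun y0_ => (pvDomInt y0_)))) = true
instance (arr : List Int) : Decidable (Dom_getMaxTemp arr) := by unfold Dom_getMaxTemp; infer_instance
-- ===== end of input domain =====

-- B replaces A's per-split slice-and-resum (O(n^2)) by one pass with a running prefix sum (O(n)).

-- ===== PORT A =====
-- the while loop 'i = 0; while i < len(arr): ...; i += 1' is a fold over range(len(arr))
def getMaxTemp (arr : List Int) : Int :=
  let _su := arr.sum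
  (List.range arr.length).foldl (fun (max_temp : Int) (i : Nat) =>
    let t1 := PySem.List.slice arr none (some ((i : Int) + 1))
    let t2 := PySem.List.slice arr (some (i : Int)) (some (arr.length : Int))
    if max t1.sum t2.sum > max_temp then max t1.sum t2.sum else max_temp) 0

-- ===== PORT B =====
def getMaxTemp_alt (arr : List Int) : Int :=
  let total := arr.sum
  (arr.foldl (fun (s : Int × Int) x =>
      let suf := total - s.2
      let pref := s.2 + x
      (max (max s.1 pref) suf, pref)) (0, 0)).1

-- ===== PRECONDITION & SPEC =====
def Spec_getMaxTemp (arr : List Int) (out : Int) : Prop := out = getMaxTemp_alt arr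
instance (arr : List Int) (out : Int) : Decidable (Spec_getMaxTemp arr out) := by unfold Spec_getMaxTemp; infer_instance

-- ===== CLAIM (what is proved, stated in full; the proofs are below) =====
def Claim_equal_getMaxTemp : Prop := ∀ (arr : List Int), Dom_getMaxTemp arr → Spec_getMaxTemp arr (getMaxTemp arr)

-- ===== LEMMAS AND PROOFS =====

-- common structural recursion: b = best so far, c = sum of consumed prefix
def pvG : List Int → Int → Int → Int
  | [], b, _ => b
  | x :: xs, b, c => pvG xs (max (max b (c + x)) (x + xs.sum)) (c + x)

theorem pvA_eq_pvG (xs : List Int) : ∀ (b c : Int),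
    (List.range xs.length).foldl (fun m i =>
      let t1 := c + ((xs.take (i + 1)).sum)
      let t2 := (xs.drop i).sum
      if max t1 t2 > m then max t1 t2 else m) b = pvG xs b c := by
  induction xs with
  | nil => intro b c; simp [pvG]
  | cons x xs ih =>
    intro b c
    rw [List.length_cons, List.range_succ_eq_map, List.foldl_cons, List.foldl_map]
    simp only [List.take_succ_cons, List.drop_succ_cons, List.take_zero, List.drop_zero,
      List.sum_cons, List.sum_nil]
    rw [pvG]
    have h1 : (if max (c + x) (x + xs.sum) > b then max (c + x) (x + xs.sum) else b)
        = max (max b (c + x)) (x + xs.sum) := by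
      rcases le_total (max (c + x) (x + xs.sum)) b with h | h
      · rw [if_neg (by omega)]; omega
      · split <;> omega
    rw [← h1]
    rw [← ih (if max (c + x) (x + xs.sum) > b then max (c + x) (x + xs.sum) else b) (c + x)]
    simp only [add_zero]
    apply PySem.List.foldl_congr_mem
    intro m i _
    simp only [← add_assoc]

theorem pvB_eq_pvG (xs : List Int) : ∀ (b p T : Int), T = p + xs.sum →
    (xs.foldl (fun (s : Int × Int) x =>
      (max (max s.1 (s.2 + x)) (T - s.2), s.2 + x)) (b, p)).1 = pvG xs b p := by
  induction xs with
  | nil => intro b p T _; simp [pvG]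
  | cons x xs ih =>
    intro b p T hT
    rw [List.foldl_cons, pvG]
    have hs : T - p = x + xs.sum := by simp [List.sum_cons] at hT; omega
    rw [hs]
    exact ih _ _ T (by simp [List.sum_cons] at hT ⊢; omega)

-- ===== VERDICT (by name: the statement is the Claim_ definition above) =====
theorem getMaxTemp_spec : Claim_equal_getMaxTemp := by
  intro arr _
  unfold Spec_getMaxTemp getMaxTemp getMaxTemp_alt
  have hA : ∀ (i : Nat),
      PySem.List.slice arr none (some ((i : Int) + 1)) = arr.take (i + 1) := by
    intro i
    have : ((i : Int) + 1) = ((i + 1 : Nat) : Int) := by push_cast; ring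
    rw [this, PySem.List.slice_to_natCast]
  have hA2 : ∀ (i : Nat),
      PySem.List.slice arr (some (i : Int)) (some (arr.length : Int)) = arr.drop i := by
    intro i
    rw [PySem.List.slice_natCast]
    exact List.take_of_length_le (by simp)
  simp only [hA, hA2]
  rw [pvB_eq_pvG arr 0 0 arr.sum (by ring)]
  rw [← pvA_eq_pvG arr 0 0]
  apply PySem.List.foldl_congr_mem
  intro m i _
  simp only [zero_add]
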